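-- pv_equiv track=rewrite | github.com/tr1ten/DNA | companies/random/mentions.py | solve
-- ===== SOURCE A (Python) =====
-- from collections import Counter
--
-- def solve(members,messages):
--     st = set(members)
--     ans = Counter()
--     for x in st: ans[x] = 0
--     for m in messages:
--         i = 0
--         ids = []
--         while i<len(m):
--             if m[i]=='@':
--                 s = ""
--                 i+=1
--                 while i<len(m) and m[i]!=' ':
--                     s += m[i]
--                     i +=1
--                 ids.append(s)
--             else: i+=1
--         vis = set()
--         for s in ids:
--             for id in s.split(","):
--                 if id in st and id not in vis:
--                     vis.add(id)
--                     ans[id] +=1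
--     return [f'{x}={ans[x]}' for x in sorted(members,key=lambda x:-ans[x])]
-- ===== SOURCE B (Python) =====
-- def solve(members, messages):
--     st = set(members)
--     cnt = {x: 0 for x in st}
--     for m in messages:
--         seen = set()
--         for w in m.split(' '):
--             j = w.find('@')
--             if j != -1:
--                 for id in w[j + 1:].split(','):
--                     if id in st:
--                         seen.add(id)
--         for id in seen:
--             cnt[id] += 1
--     return [f'{x}={cnt[x]}' for x in sorted(members, key=lambda x: -cnt[x])]
-- ===== Notes on version B (the rewrite author's own statement) =====
-- stated objective: idiomatic
-- what changed: B replaces A's hand-rolled index-based character scanner (nested while loops building tokens char by char) by an idiomatic word-level pass: split each message on ' ', take the part after the first '@' of each word via find/slice, and collect the per-message deduped valid ids in a set before bumping the counts.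
import Mathlib
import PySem

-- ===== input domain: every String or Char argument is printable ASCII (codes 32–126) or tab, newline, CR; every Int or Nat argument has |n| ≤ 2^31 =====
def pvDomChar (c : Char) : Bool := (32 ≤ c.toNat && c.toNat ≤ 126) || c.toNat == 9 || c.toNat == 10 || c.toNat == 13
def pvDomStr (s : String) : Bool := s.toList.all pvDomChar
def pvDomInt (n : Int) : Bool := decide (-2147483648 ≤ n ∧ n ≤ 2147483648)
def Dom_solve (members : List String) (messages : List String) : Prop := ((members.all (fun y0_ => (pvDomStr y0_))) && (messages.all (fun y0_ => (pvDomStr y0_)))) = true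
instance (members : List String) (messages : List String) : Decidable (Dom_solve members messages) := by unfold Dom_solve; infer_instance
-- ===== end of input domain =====

-- B replaces A's index-based character scanner by a word-level split/find/slice pass; same counts, same order (objective: idiomatic).

-- shared port of Python's s.split(",") (both versions call it); exact for the non-empty separator ","
def commaSplit (s : String) : List String :=
  (PySem.Chars.splitOn s.toList [',']).map String.ofList

-- ===== PORT A =====
-- inner `while i < len(m) and m[i] != ' '` loop of A: the token chars and the unconsumed rest
def grabA : List Char → List Char × List Char
  | [] => ([], [])
  | c :: rest =>
    if c = ' ' then ([], c :: rest)
    else ((grabA rest).1.cons c, (grabA rest).2)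

theorem grabA_len (l : List Char) : (grabA l).2.length ≤ l.length := by
  induction l with
  | nil => simp [grabA]
  | cons c rest ih =>
    simp only [grabA]
    split
    · simp
    · simp; omega

-- outer `while i < len(m)` loop of A: the list of '@'-tokens of the message
def scanA : List Char → List (List Char)
  | [] => []
  | c :: rest =>
    if c = '@' then (grabA rest).1 :: scanA (grabA rest).2
    else scanA rest
termination_by l => l.length
decreasing_by
  · have := grabA_len rest; simp; omega
  · simp

def solve (members : List String) (messages : List String) : List String :=
  let st : PySem.Set String := PySem.Set.ofList members
  let ans0 : PySem.Dict String Int := List.foldl (fun d x => d.insert x 0) PySem.Dict.empty st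
  let ans := List.foldl (fun ans m =>
      (List.foldl (fun (p : PySem.Set String × PySem.Dict String Int) s =>
          List.foldl (fun (p : PySem.Set String × PySem.Dict String Int) id =>
              if st.contains id && !(p.1.contains id)
              then (PySem.Set.add p.1 id, p.2.modify id 0 (· + 1))
              else p)
            p (commaSplit s))
        (PySem.Set.empty, ans) ((scanA m.toList).map String.ofList)).2)
    ans0 messages
  (PySem.List.sorted members (fun x => -(ans.getD x 0)) false).map
    (fun x => x ++ "=" ++ PySem.Int.toStr (ans.getD x 0))

-- ===== PORT B =====
def solve_alt (members : List String) (messages : List String) : List String :=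
  let st : PySem.Set String := PySem.Set.ofList members
  let cnt0 : PySem.Dict String Int := List.foldl (fun d x => d.insert x 0) PySem.Dict.empty st
  let cnt := List.foldl (fun cnt m =>
      List.foldl (fun (d : PySem.Dict String Int) id => d.modify id 0 (· + 1)) cnt
        (List.foldl (fun (seen : PySem.Set String) w =>
            if PySem.Chars.find w ['@'] ≠ -1 then
              List.foldl (fun (seen : PySem.Set String) id =>
                  if st.contains id then PySem.Set.add seen id else seen)
                seen
                (commaSplit (String.ofList
                  (PySem.List.slice w (some (PySem.Chars.find w ['@'] + 1)) none)))
            else seen)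
          PySem.Set.empty (PySem.Chars.splitOn m.toList [' '])))
    cnt0 messages
  (PySem.List.sorted members (fun x => -(cnt.getD x 0)) false).map
    (fun x => x ++ "=" ++ PySem.Int.toStr (cnt.getD x 0))

-- ===== PRECONDITION & SPEC =====
def Spec_solve (members : List String) (messages : List String) (out : List String) : Prop := out = solve_alt members messages
instance (members : List String) (messages : List String) (out : List String) : Decidable (Spec_solve members messages out) := by unfold Spec_solve; infer_instance

-- ===== CLAIM (what is proved, stated in full; the proofs are below) =====
def Claim_equal_solve : Prop := ∀ (members : List String) (messages : List String), Dom_solve members messages → Spec_solve members messages (solve members messages)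

-- ===== LEMMAS AND PROOFS =====

theorem grabA_spec (l : List Char) :
    grabA l = (l.takeWhile (· ≠ ' '), l.dropWhile (· ≠ ' ')) := by
  induction l with
  | nil => simp [grabA]
  | cons c rest ih =>
    simp only [grabA, List.takeWhile, List.dropWhile]
    by_cases h : c = ' ' <;> simp [h, ih]

-- structural version of Python's split on a single-character separator
def splitSp (c : Char) : List Char → List (List Char)
  | [] => [[]]
  | a :: r =>
    if a = c then [] :: splitSp c r
    else
      match splitSp c r with
      | [] => [[a]]
      | w :: ws => (a :: w) :: ws

def splitSpRest (c : Char) : List Char → List (List Char)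
  | [] => []
  | _ :: r => splitSp c r

theorem splitSp_head (c : Char) (l : List Char) :
    splitSp c l = l.takeWhile (· ≠ c) :: splitSpRest c (l.dropWhile (· ≠ c)) := by
  induction l with
  | nil => simp [splitSp, splitSpRest]
  | cons a r ih =>
    simp only [splitSp, List.takeWhile, List.dropWhile]
    by_cases h : a = c
    · simp [h, splitSpRest]
    · simp [h, ih]

theorem splitOn_go_single (c : Char) :
    ∀ (l : List Char) (fuel : Nat) (cur : List Char) (acc : List (List Char)),
      l.length ≤ fuel →
      PySem.Chars.splitOn.go [c] fuel l cur acc =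
        acc.reverse ++ (cur.reverse ++ (splitSp c l).headI) :: (splitSp c l).tail := by
  intro l
  induction l with
  | nil =>
    intro fuel cur acc _
    cases fuel <;> simp [PySem.Chars.splitOn.go, splitSp]
  | cons a rest ih =>
    intro fuel cur acc hle
    cases fuel with
    | zero => simp at hle
    | succ f =>
      simp only [PySem.Chars.splitOn.go]
      by_cases h : a = c
      · have hpre : List.isPrefixOf [c] (a :: rest) = true := by
          simp [List.isPrefixOf, h]
        simp only [hpre, if_pos]
        have : List.drop (List.length [c]) (a :: rest) = rest := by simp
        rw [this, ih f [] (cur.reverse :: acc) (by simp at hle; omega)]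
        rw [splitSp_head c rest]
        simp [splitSp, h, splitSp_head c rest]
      · have hpre : List.isPrefixOf [c] (a :: rest) = false := by
          simp [List.isPrefixOf]
          exact fun hc => h hc.symm
        simp only [hpre]
        rw [if_neg (by simp)]
        rw [ih f (a :: cur) acc (by simp at hle; omega)]
        rw [splitSp_head c rest]
        simp [splitSp, h, splitSp_head c rest]

theorem splitOn_single (c : Char) (l : List Char) :
    PySem.Chars.splitOn l [c] = splitSp c l := by
  unfold PySem.Chars.splitOn
  rw [splitOn_go_single c l (l.length + 1) [] [] (by omega)]
  rw [splitSp_head c l]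
  simp

-- the mention token contributed by one word (empty list if the word has no '@')
def tokensOf (w : List Char) : List (List Char) :=
  if '@' ∈ w then [(w.dropWhile (· ≠ '@')).tail] else []

theorem dropWhile_space_head {r : List Char} {b : Char} {r' : List Char}
    (hdrop : List.dropWhile (fun x => decide (x ≠ ' ')) r = b :: r') : b = ' ' := by
  induction r with
  | nil => simp at hdrop
  | cons a t iht =>
    rw [List.dropWhile_cons] at hdrop
    by_cases h : a = ' '
    · simp [h] at hdrop
      exact hdrop.1.symm
    · rw [if_pos (by simp [h])] at hdrop
      exact iht hdrop

theorem scanA_eq_aux : ∀ (n : Nat) (l : List Char), l.length ≤ n →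
    scanA l = (splitSp ' ' l).flatMap tokensOf := by
  intro n
  induction n with
  | zero =>
    intro l hl
    have : l = [] := by cases l <;> simp_all
    subst this
    simp [scanA, splitSp, tokensOf]
  | succ n ih =>
    intro l hl
    cases l with
    | nil => simp [scanA, splitSp, tokensOf]
    | cons a r =>
      by_cases ha : a = '@'
      · subst ha
        rw [scanA, if_pos rfl, grabA_spec]
        simp only
        rw [splitSp_head ' ' ('@' :: r)]
        have htw : List.takeWhile (· ≠ ' ') ('@' :: r) = '@' :: List.takeWhile (· ≠ ' ') r := by
          simp [List.takeWhile]
        have hdw : List.dropWhile (· ≠ ' ') ('@' :: r) = List.dropWhile (· ≠ ' ') r := by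
          simp [List.dropWhile]
        rw [htw, hdw]
        have htok : tokensOf ('@' :: List.takeWhile (· ≠ ' ') r) = [List.takeWhile (· ≠ ' ') r] := by
          simp [tokensOf, List.dropWhile]
        cases hdrop : List.dropWhile (· ≠ ' ') r with
        | nil =>
          rw [splitSpRest]
          rw [List.flatMap_cons, htok, List.flatMap_nil]
          simp [scanA]
        | cons b r' =>
          have hb : b = ' ' := dropWhile_space_head hdrop
          subst hb
          have hr' : r'.length ≤ n := by
            have h1 := List.length_dropWhile_le (fun x => decide (x ≠ ' ')) r
            rw [hdrop] at h1
            simp at h1 hl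
            omega
          rw [splitSpRest]
          rw [List.flatMap_cons, htok]
          rw [scanA, if_neg (by decide)]
          rw [ih r' hr']
          simp
      · rw [scanA, if_neg ha]
        by_cases hsp : a = ' '
        · subst hsp
          rw [show splitSp ' ' (' ' :: r) = [] :: splitSp ' ' r from by simp [splitSp]]
          rw [List.flatMap_cons]
          rw [show tokensOf [] = [] from by simp [tokensOf]]
          simp at hl
          rw [ih r (by omega)]
          simp
        · rw [splitSp_head ' ' (a :: r)]
          have htw : List.takeWhile (· ≠ ' ') (a :: r) = a :: List.takeWhile (· ≠ ' ') r := by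
            simp [List.takeWhile, hsp]
          have hdw : List.dropWhile (· ≠ ' ') (a :: r) = List.dropWhile (· ≠ ' ') r := by
            simp [List.dropWhile, hsp]
          rw [htw, hdw]
          have hat : ('@' : Char) ≠ a := fun hc => ha hc.symm
          have htok : tokensOf (a :: List.takeWhile (· ≠ ' ') r)
              = tokensOf (List.takeWhile (· ≠ ' ') r) := by
            unfold tokensOf
            by_cases hm : '@' ∈ List.takeWhile (· ≠ ' ') r
            · rw [if_pos (List.mem_cons_of_mem a hm), if_pos hm,
                List.dropWhile_cons, if_pos (by simp [ha])]
            · rw [if_neg (fun hx => hm ((List.mem_cons.mp hx).resolve_left hat)),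
                if_neg hm]
          rw [List.flatMap_cons, htok]
          simp at hl
          rw [ih r (by omega)]
          rw [splitSp_head ' ' r, List.flatMap_cons]

theorem scanA_eq (l : List Char) : scanA l = (splitSp ' ' l).flatMap tokensOf :=
  scanA_eq_aux l.length l le_rfl

theorem find_go_single (c : Char) :
    ∀ (l : List Char) (k : Nat),
      PySem.Chars.find.go [c] l k =
        if c ∈ l then ((k : Int) + (l.takeWhile (· ≠ c)).length) else -1 := by
  intro l
  induction l with
  | nil => intro k; simp [PySem.Chars.find.go]
  | cons a t ih =>
    intro k
    rw [PySem.Chars.find.go]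
    by_cases h : c = a
    · subst h
      have : List.isPrefixOf [c] (c :: t) = true := by simp [List.isPrefixOf]
      simp [this, List.takeWhile]
    · have hpre : List.isPrefixOf [c] (a :: t) = false := by
        simp [List.isPrefixOf]
        exact h
      rw [hpre]
      simp only [Bool.false_eq_true, if_false]
      rw [ih (k + 1)]
      have htkw : List.takeWhile (· ≠ c) (a :: t) = a :: List.takeWhile (· ≠ c) t := by
        rw [List.takeWhile_cons, if_pos (by simp; exact fun hc => h hc.symm)]
      by_cases hm : c ∈ t
      · rw [if_pos hm, if_pos (by simp [List.mem_cons, hm]), htkw]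
        simp
        omega
      · rw [if_neg hm, if_neg (by simp [List.mem_cons, hm]; exact h)]

theorem find_single (c : Char) (w : List Char) :
    PySem.Chars.find w [c] =
      if c ∈ w then ((w.takeWhile (· ≠ c)).length : Int) else -1 := by
  unfold PySem.Chars.find
  rw [find_go_single]
  simp

theorem drop_tw (p : Char → Bool) (u : List Char) :
    List.drop (List.takeWhile p u).length u = List.dropWhile p u := by
  induction u with
  | nil => simp
  | cons a t ih =>
    rw [List.takeWhile_cons, List.dropWhile_cons]
    by_cases h : p a = true
    · rw [if_pos h, if_pos h]
      simpa using ih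
    · rw [if_neg h, if_neg h]
      simp

def idsC (t : List Char) : List String := commaSplit (String.ofList t)

theorem word_ids (w : List Char) :
    (if PySem.Chars.find w ['@'] ≠ -1 then
        commaSplit (String.ofList (PySem.List.slice w (some (PySem.Chars.find w ['@'] + 1)) none))
      else []) = (tokensOf w).flatMap idsC := by
  rw [find_single]
  by_cases h : '@' ∈ w
  · rw [if_pos h, if_pos (by simp)]
    have hn : (0 : Int) ≤ ((w.takeWhile (· ≠ '@')).length : Int) + 1 := by positivity
    rw [PySem.List.slice_from w hn]
    have htoNat : (((w.takeWhile (· ≠ '@')).length : Int) + 1).toNat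
        = (w.takeWhile (· ≠ '@')).length + 1 := by omega
    rw [htoNat]
    have hdrop : List.drop ((w.takeWhile (· ≠ '@')).length + 1) w
        = (w.dropWhile (· ≠ '@')).tail := by
      rw [← List.drop_drop (i := 1), drop_tw, List.drop_one]
    rw [hdrop]
    simp [tokensOf, h, idsC]
  · rw [if_neg h]
    rw [if_neg (by simp)]
    simp [tokensOf, h]

-- the new valid ids of one message, in first-occurrence order, given the already-seen set
def newIds (st : PySem.Set String) : List String → PySem.Set String → List String
  | [], _ => []
  | id :: ids, vis =>
    if st.contains id && !(vis.contains id) then id :: newIds st ids (PySem.Set.add vis id)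
    else newIds st ids vis

theorem set_add_of_contains {s : PySem.Set String} {x : String} (h : s.contains x = true) :
    PySem.Set.add s x = s := by
  unfold PySem.Set.add; rw [if_pos h]

theorem set_add_of_not_contains {s : PySem.Set String} {x : String} (h : s.contains x = false) :
    PySem.Set.add s x = s ++ [x] := by
  unfold PySem.Set.add; rw [if_neg (by simp only [h]; decide)]

theorem A_fold (st : PySem.Set String) :
    ∀ (ids : List String) (vis : PySem.Set String) (ans : PySem.Dict String Int),
      List.foldl (fun (p : PySem.Set String × PySem.Dict String Int) id =>
          if st.contains id && !(p.1.contains id)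
          then (PySem.Set.add p.1 id, p.2.modify id 0 (· + 1))
          else p) (vis, ans) ids
      = (List.foldl (fun v id => if st.contains id then PySem.Set.add v id else v) vis ids,
         List.foldl (fun (d : PySem.Dict String Int) id => d.modify id 0 (· + 1)) ans
           (newIds st ids vis)) := by
  intro ids
  induction ids with
  | nil => intro vis ans; simp [newIds]
  | cons id ids ih =>
    intro vis ans
    simp only [List.foldl_cons, newIds]
    by_cases hst : st.contains id = true
    · by_cases hv : vis.contains id = true
      · rw [if_neg (by rw [hst, hv]; decide), if_pos hst, if_neg (by rw [hst, hv]; decide),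
          set_add_of_contains hv]
        exact ih vis ans
      · rw [Bool.not_eq_true] at hv
        rw [if_pos (by rw [hst, hv]; decide), if_pos hst, if_pos (by rw [hst, hv]; decide)]
        simp only [List.foldl_cons]
        exact ih (PySem.Set.add vis id) (PySem.Dict.modify ans id 0 (· + 1))
    · rw [Bool.not_eq_true] at hst
      rw [if_neg (by rw [hst]; simp), if_neg (by rw [hst]; simp), if_neg (by rw [hst]; simp)]
      exact ih vis ans

theorem seen_eq (st : PySem.Set String) :
    ∀ (ids : List String) (vis : PySem.Set String),
      List.foldl (fun v id => if st.contains id then PySem.Set.add v id else v) vis ids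
        = vis ++ newIds st ids vis := by
  intro ids
  induction ids with
  | nil => intro vis; simp [newIds]
  | cons id ids ih =>
    intro vis
    simp only [List.foldl_cons, newIds]
    by_cases hst : st.contains id = true
    · by_cases hv : vis.contains id = true
      · rw [if_pos hst, set_add_of_contains hv, if_neg (by rw [hst, hv]; decide)]
        exact ih vis
      · rw [Bool.not_eq_true] at hv
        rw [if_pos hst, if_pos (by rw [hst, hv]; decide)]
        rw [ih (PySem.Set.add vis id), set_add_of_not_contains hv]
        simp
    · rw [Bool.not_eq_true] at hst
      rw [if_neg (by rw [hst]; simp), if_neg (by rw [hst]; simp)]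
      exact ih vis

theorem message_eq (st : PySem.Set String) (ans : PySem.Dict String Int) (m : String) :
    (List.foldl (fun (p : PySem.Set String × PySem.Dict String Int) s =>
        List.foldl (fun (p : PySem.Set String × PySem.Dict String Int) id =>
            if st.contains id && !(p.1.contains id)
            then (PySem.Set.add p.1 id, p.2.modify id 0 (· + 1))
            else p)
          p (commaSplit s))
      (PySem.Set.empty, ans) ((scanA m.toList).map String.ofList)).2
    = List.foldl (fun (d : PySem.Dict String Int) id => d.modify id 0 (· + 1)) ans
        (List.foldl (fun (seen : PySem.Set String) w =>
            if PySem.Chars.find w ['@'] ≠ -1 then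
              List.foldl (fun (seen : PySem.Set String) id =>
                  if st.contains id then PySem.Set.add seen id else seen)
                seen
                (commaSplit (String.ofList
                  (PySem.List.slice w (some (PySem.Chars.find w ['@'] + 1)) none)))
            else seen)
          PySem.Set.empty (PySem.Chars.splitOn m.toList [' '])) := by
  -- flatten A's nested fold into a fold over the flat id list
  rw [← List.foldl_flatMap (f := commaSplit)]
  rw [List.flatMap_map]
  -- flatten B's per-word fold the same way
  have hB : List.foldl (fun (seen : PySem.Set String) w =>
        if PySem.Chars.find w ['@'] ≠ -1 then
          List.foldl (fun (seen : PySem.Set String) id =>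
              if st.contains id then PySem.Set.add seen id else seen)
            seen
            (commaSplit (String.ofList
              (PySem.List.slice w (some (PySem.Chars.find w ['@'] + 1)) none)))
        else seen)
      PySem.Set.empty (PySem.Chars.splitOn m.toList [' '])
      = List.foldl (fun v id => if st.contains id then PySem.Set.add v id else v)
          PySem.Set.empty ((scanA m.toList).flatMap idsC) := by
    have hstep : ∀ (seen : PySem.Set String) (w : List Char),
        (if PySem.Chars.find w ['@'] ≠ -1 then
            List.foldl (fun (seen : PySem.Set String) id =>
                if st.contains id then PySem.Set.add seen id else seen)
              seen
              (commaSplit (String.ofList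
                (PySem.List.slice w (some (PySem.Chars.find w ['@'] + 1)) none)))
          else seen)
        = List.foldl (fun v id => if st.contains id then PySem.Set.add v id else v)
            seen ((tokensOf w).flatMap idsC) := by
      intro seen w
      rw [← word_ids w]
      by_cases h : PySem.Chars.find w ['@'] ≠ -1
      · rw [if_pos h, if_pos h]
      · rw [if_neg h, if_neg h]
        simp
    calc List.foldl _ PySem.Set.empty (PySem.Chars.splitOn m.toList [' '])
        = List.foldl (fun seen w =>
            List.foldl (fun v id => if st.contains id then PySem.Set.add v id else v)
              seen ((tokensOf w).flatMap idsC))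
            PySem.Set.empty (PySem.Chars.splitOn m.toList [' ']) := by
          exact List.foldl_ext _ _ _ (fun seen w _ => hstep seen w)
      _ = List.foldl (fun v id => if st.contains id then PySem.Set.add v id else v)
            PySem.Set.empty ((PySem.Chars.splitOn m.toList [' ']).flatMap
              (fun w => (tokensOf w).flatMap idsC)) := by
          rw [List.foldl_flatMap]
      _ = _ := by
          rw [splitOn_single]
          have hassoc : ∀ ws : List (List Char),
              ws.flatMap (fun w => (tokensOf w).flatMap idsC)
                = (ws.flatMap tokensOf).flatMap idsC := by
            intro ws
            induction ws with
            | nil => simp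
            | cons w ws ihw => simp [List.flatMap_cons, ihw]
          rw [hassoc, ← scanA_eq]
  rw [hB]
  have hids : (scanA m.toList).flatMap (fun a => commaSplit (String.ofList a))
      = (scanA m.toList).flatMap idsC := rfl
  rw [hids, A_fold st ((scanA m.toList).flatMap idsC) PySem.Set.empty ans,
    seen_eq st ((scanA m.toList).flatMap idsC) PySem.Set.empty]
  simp [PySem.Set.empty]

theorem solve_eq_alt (members messages : List String) :
    solve members messages = solve_alt members messages := by
  simp only [solve, solve_alt]
  have h : List.foldl (fun ans m =>
        (List.foldl (fun (p : PySem.Set String × PySem.Dict String Int) s =>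
            List.foldl (fun (p : PySem.Set String × PySem.Dict String Int) id =>
                if (PySem.Set.ofList members).contains id && !(p.1.contains id)
                then (PySem.Set.add p.1 id, p.2.modify id 0 (· + 1))
                else p)
              p (commaSplit s))
          (PySem.Set.empty, ans) ((scanA m.toList).map String.ofList)).2)
      (List.foldl (fun d x => d.insert x 0) PySem.Dict.empty (PySem.Set.ofList members))
      messages
      = List.foldl (fun cnt m =>
          List.foldl (fun (d : PySem.Dict String Int) id => d.modify id 0 (· + 1)) cnt
            (List.foldl (fun (seen : PySem.Set String) w =>
                if PySem.Chars.find w ['@'] ≠ -1 then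
                  List.foldl (fun (seen : PySem.Set String) id =>
                      if (PySem.Set.ofList members).contains id then PySem.Set.add seen id else seen)
                    seen
                    (commaSplit (String.ofList
                      (PySem.List.slice w (some (PySem.Chars.find w ['@'] + 1)) none)))
                else seen)
              PySem.Set.empty (PySem.Chars.splitOn m.toList [' '])))
        (List.foldl (fun d x => d.insert x 0) PySem.Dict.empty (PySem.Set.ofList members))
        messages :=
    List.foldl_ext _ _ _ (fun d m _ => message_eq (PySem.Set.ofList members) d m)
  rw [h]

-- ===== VERDICT (by name: the statement is the Claim_ definition above) =====
theorem solve_spec : Claim_equal_solve := by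
  intro members messages _
  unfold Spec_solve
  exact solve_eq_alt members messages
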